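-- pv_equiv track=rewrite | github.com/cashenchris/freegroups | representatives_of_AutF_orbits/canonical_representative.py | shortlexmin
-- ===== SOURCE A (Python) =====
-- def shortlexleq(w,v):
--     """
--     Compare words w and v in shortlex ordering.
--     """
--     if len(w)<len(v):
--         return True
--     elif len(v)<len(w):
--         return False
--     else:
--         try:
--             return w.letters<=v.letters
--         except AttributeError:
--             return list(w)<=list(v)
--
-- def shortlexmin2(w,v):
--     if shortlexleq(w,v):
--         return w
--     else:
--         return v
--
-- def shortlexmin(iterable):
--     """
--     Return shortlex minimal element.
--     """
--     listofelements=list(iterable)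
--     if len(listofelements)==0:
--         raise ValueError("shortlexmin arg is empty sequence")
--     elif len(listofelements)==1:
--         return listofelements[0]
--     else:
--         return shortlexmin2(shortlexmin(listofelements[:len(listofelements)//2]),shortlexmin(listofelements[len(listofelements)//2:]))
-- ===== SOURCE B (Python) =====
-- def shortlexleq(w, v):
--     """
--     Compare words w and v in shortlex ordering.
--     """
--     if len(w) < len(v):
--         return True
--     elif len(v) < len(w):
--         return False
--     else:
--         try:
--             return w.letters <= v.letters
--         except AttributeError:
--             return list(w) <= list(v)
--
-- def shortlexmin(iterable):
--     """
--     Return shortlex minimal element.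
--     """
--     elems = list(iterable)
--     if len(elems) == 0:
--         raise ValueError("shortlexmin arg is empty sequence")
--     best = elems[0]
--     for x in elems[1:]:
--         if not shortlexleq(best, x):
--             best = x
--     return best
-- ===== Notes on version B (the rewrite author's own statement) =====
-- stated objective: simpler
-- what changed: Replaces the recursive halve-and-combine minimum with a flat single left-to-right pass keeping the current best, updating only on strictly shortlex-smaller elements (same leftmost-minimum tie-breaking).
import Mathlib
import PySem

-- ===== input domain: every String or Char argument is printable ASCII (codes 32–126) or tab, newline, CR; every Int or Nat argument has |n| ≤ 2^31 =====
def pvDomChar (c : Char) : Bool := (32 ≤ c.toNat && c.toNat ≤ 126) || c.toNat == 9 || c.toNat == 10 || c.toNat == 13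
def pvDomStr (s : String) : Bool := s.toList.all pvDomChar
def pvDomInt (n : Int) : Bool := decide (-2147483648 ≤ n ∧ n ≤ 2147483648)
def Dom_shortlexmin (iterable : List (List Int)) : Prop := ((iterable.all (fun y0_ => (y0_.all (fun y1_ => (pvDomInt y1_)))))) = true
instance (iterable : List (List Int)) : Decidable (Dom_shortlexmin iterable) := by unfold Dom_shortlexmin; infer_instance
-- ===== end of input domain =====

-- B replaces A's recursive halve-and-combine minimum by one flat left-to-right pass
-- (updating only on strictly shortlex-smaller elements): simpler, same results.
-- Both Pythons raise ValueError on the empty list; Pre_ excludes exactly that input.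

-- ===== PORT A =====
-- Python list `<=` on equal- or unequal-length lists (lexicographic, shorter prefix wins).
def pyListLe : List Int → List Int → Bool
  | [], _ => true
  | _ :: _, [] => false
  | a :: w, b :: v => if a < b then true else if b < a then false else pyListLe w v

-- helper shortlexleq (the AttributeError branch: plain lists, so `list(w) <= list(v)`)
def shortlexleq (w v : List Int) : Bool :=
  if w.length < v.length then true
  else if v.length < w.length then false
  else pyListLe w v

def shortlexmin2 (w v : List Int) : List Int :=
  if shortlexleq w v then w else v

-- l[:k] / l[k:] with 0 ≤ k = len//2 are exactly take k / drop k.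
def shortlexmin (iterable : List (List Int)) : List Int :=
  if _h0 : iterable.length = 0 then []   -- Python raises ValueError here (outside Pre_)
  else if _h1 : iterable.length = 1 then iterable.getD 0 []
  else
    shortlexmin2 (shortlexmin (iterable.take (iterable.length / 2)))
                 (shortlexmin (iterable.drop (iterable.length / 2)))
termination_by iterable.length
decreasing_by
  · simp only [List.length_take]; omega
  · simp only [List.length_drop]; omega

-- ===== PORT B =====
def shortlexmin_alt (iterable : List (List Int)) : List Int :=
  match iterable with
  | [] => []   -- Python raises ValueError here (outside Pre_)
  | best :: rest => rest.foldl (fun best x => if !(shortlexleq best x) then x else best) best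

-- ===== PRECONDITION & SPEC =====
-- A (and B) raise ValueError on the empty sequence; everything else is admitted.
def Pre_shortlexmin (iterable : List (List Int)) : Prop := iterable ≠ []
instance (iterable : List (List Int)) : Decidable (Pre_shortlexmin iterable) := by
  unfold Pre_shortlexmin; infer_instance
def pvWitness_shortlexmin : List (List Int) := [[1, -2], [3]]

def Spec_shortlexmin (iterable : List (List Int)) (out : List Int) : Prop := out = shortlexmin_alt iterable
instance (iterable : List (List Int)) (out : List Int) : Decidable (Spec_shortlexmin iterable out) := by unfold Spec_shortlexmin; infer_instance

-- ===== CLAIM (what is proved, stated in full; the proofs are below) =====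
def Claim_equal_shortlexmin : Prop := ∀ (iterable : List (List Int)), Dom_shortlexmin iterable → Pre_shortlexmin iterable → Spec_shortlexmin iterable (shortlexmin iterable)

-- ===== LEMMAS AND PROOFS =====

theorem pyListLe_total (a b : List Int) (h : pyListLe a b = false) : pyListLe b a = true := by
  induction a generalizing b with
  | nil => simp [pyListLe] at h
  | cons x xs ih =>
    cases b with
    | nil => simp [pyListLe]
    | cons y ys =>
      simp only [pyListLe] at h ⊢
      rcases lt_trichotomy x y with hxy | hxy | hxy
      · simp [hxy] at h
      · subst hxy
        simp only [lt_self_iff_false, if_false] at h ⊢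
        exact ih ys h
      · simp [hxy]

theorem pyListLe_trans (a b c : List Int) (hab : pyListLe a b = true)
    (hbc : pyListLe b c = true) : pyListLe a c = true := by
  induction a generalizing b c with
  | nil => simp [pyListLe]
  | cons x xs ih =>
    cases b with
    | nil => simp [pyListLe] at hab
    | cons y ys =>
      cases c with
      | nil => simp [pyListLe] at hbc
      | cons z zs =>
        simp only [pyListLe] at hab hbc ⊢
        rcases lt_trichotomy x y with hxy | hxy | hxy
        · rcases lt_trichotomy y z with hyz | hyz | hyz
          · simp [show x < z from lt_trans hxy hyz]
          · subst hyz; simp [hxy]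
          · simp [show ¬ y < z by omega, hyz] at hbc
        · subst hxy
          rcases lt_trichotomy x z with hyz | hyz | hyz
          · simp [hyz]
          · subst hyz
            simp only [lt_self_iff_false, if_false] at hab hbc ⊢
            exact ih ys zs hab hbc
          · simp [show ¬ x < z by omega, hyz] at hbc
        · simp [show ¬ x < y by omega, hxy] at hab

theorem shortlexleq_total (a b : List Int) (h : shortlexleq a b = false) :
    shortlexleq b a = true := by
  unfold shortlexleq at h ⊢
  rcases lt_trichotomy a.length b.length with hl | hl | hl
  · simp [hl] at h
  · simp only [hl, lt_self_iff_false, if_false] at h ⊢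
    exact pyListLe_total a b h
  · simp [hl]

theorem shortlexleq_trans (a b c : List Int) (hab : shortlexleq a b = true)
    (hbc : shortlexleq b c = true) : shortlexleq a c = true := by
  unfold shortlexleq at hab hbc ⊢
  rcases lt_trichotomy a.length b.length with h1 | h1 | h1
  · rcases lt_trichotomy b.length c.length with h2 | h2 | h2
    · simp [show a.length < c.length by omega]
    · simp [show a.length < c.length by omega]
    · simp [show ¬ b.length < c.length by omega, h2] at hbc
  · rcases lt_trichotomy b.length c.length with h2 | h2 | h2
    · simp [show a.length < c.length by omega]
    · simp only [h1, h2, lt_self_iff_false, if_false] at hab hbc ⊢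
      exact pyListLe_trans a b c hab hbc
    · simp [show ¬ b.length < c.length by omega, h2] at hbc
  · simp [show ¬ a.length < b.length by omega, h1] at hab

theorem shortlexmin2_assoc (w z m : List Int) :
    shortlexmin2 (shortlexmin2 w z) m = shortlexmin2 w (shortlexmin2 z m) := by
  unfold shortlexmin2
  by_cases hwz : shortlexleq w z = true
  · by_cases hzm : shortlexleq z m = true
    · simp [hwz, hzm, shortlexleq_trans w z m hwz hzm]
    · simp [hwz, hzm]
  · by_cases hzm : shortlexleq z m = true
    · simp [hwz, hzm]
    · have hmz := shortlexleq_total z m (by simpa using hzm)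
      have hwm : ¬ shortlexleq w m = true := fun h => hwz (shortlexleq_trans w m z h hmz)
      simp [hwz, hzm, hwm]

theorem fold_step (best x : List Int) :
    (if !(shortlexleq best x) then x else best) = shortlexmin2 best x := by
  unfold shortlexmin2
  cases h : shortlexleq best x <;> simp

theorem foldl_min2 (zs : List (List Int)) (w z : List Int) :
    List.foldl (fun best x => if !(shortlexleq best x) then x else best) w (z :: zs)
      = shortlexmin2 w
          (List.foldl (fun best x => if !(shortlexleq best x) then x else best) z zs) := by
  induction zs generalizing w z with
  | nil =>
    simp only [List.foldl_cons, List.foldl_nil]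
    exact fold_step w z
  | cons u us ih =>
    calc List.foldl (fun best x => if !(shortlexleq best x) then x else best) w (z :: u :: us)
        = List.foldl (fun best x => if !(shortlexleq best x) then x else best)
            (if !(shortlexleq w z) then z else w) (u :: us) := rfl
      _ = shortlexmin2 (if !(shortlexleq w z) then z else w)
            (List.foldl (fun best x => if !(shortlexleq best x) then x else best) u us) :=
          ih _ u
      _ = shortlexmin2 (shortlexmin2 w z)
            (List.foldl (fun best x => if !(shortlexleq best x) then x else best) u us) := by
          rw [fold_step]
      _ = shortlexmin2 w (shortlexmin2 z
            (List.foldl (fun best x => if !(shortlexleq best x) then x else best) u us)) :=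
          shortlexmin2_assoc _ _ _
      _ = shortlexmin2 w
            (List.foldl (fun best x => if !(shortlexleq best x) then x else best) z (u :: us)) := by
          rw [← ih z u]

theorem alt_append (xs ys : List (List Int)) (hx : xs ≠ []) (hy : ys ≠ []) :
    shortlexmin_alt (xs ++ ys) = shortlexmin2 (shortlexmin_alt xs) (shortlexmin_alt ys) := by
  cases xs with
  | nil => exact absurd rfl hx
  | cons x xs' =>
    cases ys with
    | nil => exact absurd rfl hy
    | cons y ys' =>
      simp only [shortlexmin_alt, List.cons_append, List.foldl_append]
      exact foldl_min2 ys' (List.foldl _ x xs') y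

theorem shortlexmin_eq_alt_bounded :
    ∀ (n : Nat) (l : List (List Int)), l.length ≤ n → l ≠ [] →
      shortlexmin l = shortlexmin_alt l := by
  intro n
  induction n with
  | zero =>
    intro l hl hne
    have := List.length_pos_of_ne_nil hne
    omega
  | succ n ih =>
    intro l hl hne
    have hpos : 0 < l.length := List.length_pos_of_ne_nil hne
    rw [shortlexmin]
    by_cases h1 : l.length = 1
    · simp only [dif_neg (by omega : ¬ l.length = 0), dif_pos h1]
      cases l with
      | nil => simp at hpos
      | cons x xs =>
        cases xs with
        | nil => simp [shortlexmin_alt]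
        | cons y ys => simp at h1
    · simp only [dif_neg (by omega : ¬ l.length = 0), dif_neg h1]
      have hk : 1 ≤ l.length / 2 := by omega
      have hkl : l.length / 2 < l.length := by omega
      have htake : (l.take (l.length / 2)).length = l.length / 2 := by
        simp [List.length_take]
        omega
      have hdrop : (l.drop (l.length / 2)).length = l.length - l.length / 2 := by simp
      have htne : l.take (l.length / 2) ≠ [] := by
        intro hc
        rw [hc] at htake
        simp at htake
        omega
      have hdne : l.drop (l.length / 2) ≠ [] := by
        intro hc
        rw [hc] at hdrop
        simp at hdrop
        omega
      rw [ih _ (by omega) htne, ih _ (by omega) hdne,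
          ← alt_append _ _ htne hdne, List.take_append_drop]

theorem shortlexmin_eq_alt (l : List (List Int)) (h : l ≠ []) :
    shortlexmin l = shortlexmin_alt l :=
  shortlexmin_eq_alt_bounded l.length l (le_refl _) h

-- ===== VERDICT (by name: the statement is the Claim_ definition above) =====
theorem shortlexmin_spec : Claim_equal_shortlexmin := by
  intro iterable _ hpre
  unfold Spec_shortlexmin
  exact shortlexmin_eq_alt iterable hpre
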